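-- pv_equiv track=rewrite | github.com/nicombrana/parserBlackBox | parser/PossibleParser.py | compareLogLinesWithin
-- ===== SOURCE A (Python) =====
-- def compareLogLinesWithin(aLogLineArray, aToken):
--     structuredLine = ""
--     aStructuredLogLineList = []
--     for line in aLogLineArray:
--         similarLines = list(filter(lambda a: sameLength(line, a, aToken), aLogLineArray))
--         similarLines.remove(line)
--         structuredLine = getStructuredLine(line, similarLines, aToken)
--         aStructuredLogLineList.append(structuredLine)
--     return makeSet(aStructuredLogLineList)
--
-- def getStructuredLine(aLine, aListOfLines, aToken):
--     structuredLine = aLine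
--     for similar in aListOfLines:
--         answer = structurizedSimilarLines(aLine, similar, 2, aToken)
--         if structuredLine.count("*") < answer.count("*"):
--             structuredLine = answer
--     return structuredLine
--
-- def structurizedSimilarLines(aLogLine, anotherLogLine, maxParamValues, aToken):
--     if bothHaveTheToken(aLogLine, anotherLogLine, aToken):
--         return structurizedLogLineConsideringToken(aLogLine, anotherLogLine, maxParamValues, aToken)
--     if not(hasToken(aLogLine, aToken)) & (not(hasToken(anotherLogLine, aToken))):
--         return structurizedLogLines(aLogLine, anotherLogLine, maxParamValues)
--
-- def structurizedLogLineConsideringToken(aLogLine, anotherLogLine, maxParamValues, aToken):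
--     firstLogLine = splitTextIntoByToken(aLogLine, aToken)
--     secondLogLine = splitTextIntoByToken(anotherLogLine, aToken)
--
--     structuredLine = structurizedLogLines(firstLogLine[0], secondLogLine[0], maxParamValues)
--     structuredLineArray = [structuredLine]
--     structuredLineArray.append("")
--     structuredLineArray[1] = firstLogLine[1]
--     if firstLogLine[1] != secondLogLine[1]:
--         structuredLineArray[1] = " *"
--     return aToken.join(structuredLineArray)
--
-- def structurizedLogLines(aLogLine, anotherLogLine, maxParamValues):
--     logLineList = splitTextIntoByToken(aLogLine, " ")
--     anotherLogLineList = splitTextIntoByToken(anotherLogLine, " ")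
--     structuredLine = structurizedLineList(logLineList, anotherLogLineList)
--     if structuredLine.count("*") > maxParamValues:
--         return aLogLine
--     return structuredLine
--
-- def structurizedLineList(aLineList, anotherLineList):
--     structuredLineList = []
--     for index in range(len(aLineList)):
--         aWord = aLineList[index]
--         anotherWord = anotherLineList[index]
--         structuredLineList.append(structurizedIfEqualWords(aWord, anotherWord))
--     return " ".join(structuredLineList)
--
-- def structurizedIfEqualWords(aWord, anotherWord):
--     if aWord != anotherWord:
--         return "*"
--     return aWord
--
-- def bothHaveTheToken(aLogLine, anotherLogLine, aToken):
--     return hasToken(aLogLine, aToken) & hasToken(anotherLogLine, aToken)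
--
-- def hasToken(aLogLine, aToken):
--     return (aLogLine.count(aToken) > 0)
--
-- def sameLength(aLogLine, anotherLogLine, aToken):
--     if (bothHaveTheToken(aLogLine, anotherLogLine, aToken)):
--         aLine = splitTextIntoByToken(aLogLine, aToken)
--         aLine = splitTextIntoByToken(aLine[0], " ")
--         anotherLine = splitTextIntoByToken(anotherLogLine, aToken)
--         anotherLine = splitTextIntoByToken(anotherLine[0], " ")
--         return len(aLine) == len(anotherLine)
--     if not(hasToken(aLogLine, aToken)) & (not(hasToken(anotherLogLine, aToken))):
--         logLineList = splitTextIntoByToken(aLogLine, " ")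
--         anotherLogLineList = splitTextIntoByToken(anotherLogLine, " ")
--         return len(logLineList) == len(anotherLogLineList)
--     return False
--
-- def splitTextIntoByToken(aText, aToken):
--     return aText.split(aToken)
--
-- def makeSet(aList):
--     set = []
--     for index in range(len(aList)):
--         if set.count(aList[index]) == 0:
--             set.append(aList[index])
--     return set
-- ===== SOURCE B (Python) =====
-- def compareLogLinesWithin(aLogLineArray, aToken):
--     # Build two indices once: byWC maps full word count -> every line (the
--     # neighbour set of a token-less line), byHead maps head word count -> the
--     # lines containing the token (the neighbour set of a line with the token).
--     byWC = {}
--     byHead = {}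
--     info = []
--     for line in aLogLineArray:
--         wc = len(line.split(' '))
--         byWC.setdefault(wc, []).append(line)
--         if aToken in line:
--             hc = len(line.split(aToken)[0].split(' '))
--             byHead.setdefault(hc, []).append(line)
--             info.append((True, hc))
--         else:
--             info.append((False, wc))
--
--     def mergeWords(a, b):
--         merged = ' '.join(w if w == v else '*'
--                           for w, v in zip(a.split(' '), b.split(' ')))
--         return a if merged.count('*') > 2 else merged
--
--     def mergePair(x, y):
--         if aToken in x:
--             fx = x.split(aToken)
--             fy = y.split(aToken)
--             tail = fx[1] if fx[1] == fy[1] else ' *'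
--             return mergeWords(fx[0], fy[0]) + aToken + tail
--         return mergeWords(x, y)
--
--     out = {}
--     for line, (hasTok, k) in zip(aLogLineArray, info):
--         grp = list(byHead[k] if hasTok else byWC[k])
--         grp.remove(line)
--         best = max([line] + [mergePair(line, o) for o in grp],
--                    key=lambda s: s.count('*'))
--         out[best] = None
--     return list(out)
-- ===== Notes on version B (the rewrite author's own statement) =====
-- stated objective: faster
-- what changed: B precomputes two hash indices in one pass (full word count -> lines, head word count -> token lines) and looks up each line's merge group, replacing A's per-line filter that re-splits and re-compares every pair via sameLength; the improve-loop becomes max(key=star count) and makeSet's quadratic count-based dedup becomes dict-key dedup.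
import Mathlib
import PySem

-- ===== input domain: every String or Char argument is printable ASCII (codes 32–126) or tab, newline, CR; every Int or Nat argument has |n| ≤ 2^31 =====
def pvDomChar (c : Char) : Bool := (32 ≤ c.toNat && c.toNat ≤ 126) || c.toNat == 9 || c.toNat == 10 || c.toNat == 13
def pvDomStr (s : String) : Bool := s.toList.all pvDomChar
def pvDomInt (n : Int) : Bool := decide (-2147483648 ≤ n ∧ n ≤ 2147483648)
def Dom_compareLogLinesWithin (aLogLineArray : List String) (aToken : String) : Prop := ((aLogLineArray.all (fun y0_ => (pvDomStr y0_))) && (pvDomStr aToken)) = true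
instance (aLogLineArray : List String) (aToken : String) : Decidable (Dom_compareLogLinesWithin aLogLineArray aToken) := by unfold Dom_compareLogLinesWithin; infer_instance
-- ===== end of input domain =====

-- B replaces A's per-line rescan of the whole array (filter + sameLength on every pair)
-- by two precomputed indices (word-count → lines, head-word-count → token lines) built in
-- one pass, and replaces the improve-loop by max(..., key=count) and makeSet by dict keys.

-- ===== PORT A =====
-- s.split(sep): exact for sep ≠ "" (Python raises ValueError on sep = "", which here
-- happens only for aToken = "" — excluded by Pre_).
def splitTextIntoByToken (aText aToken : String) : List String :=
  (PySem.Str.split? aText aToken).getD []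

def hasToken (aLogLine aToken : String) : Bool :=
  decide (PySem.Str.count aLogLine aToken > 0)

def bothHaveTheToken (aLogLine anotherLogLine aToken : String) : Bool :=
  hasToken aLogLine aToken && hasToken anotherLogLine aToken

def structurizedIfEqualWords (aWord anotherWord : String) : String :=
  if aWord ≠ anotherWord then "*" else aWord

-- anotherLineList[index] is in range in every call reachable from the entry point
-- (the compared lists have equal length there; Python would raise IndexError otherwise)
def structurizedLineList (aLineList anotherLineList : List String) : String :=
  PySem.Str.join " " ((List.range aLineList.length).map fun index =>
    structurizedIfEqualWords (aLineList.getD index "") (anotherLineList.getD index ""))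

def structurizedLogLines (aLogLine anotherLogLine : String) (maxParamValues : Int) : String :=
  let logLineList := splitTextIntoByToken aLogLine " "
  let anotherLogLineList := splitTextIntoByToken anotherLogLine " "
  let structuredLine := structurizedLineList logLineList anotherLogLineList
  if (PySem.Str.count structuredLine "*" : Int) > maxParamValues then aLogLine
  else structuredLine

-- firstLogLine[0]/[1] exist in every call reachable from the entry point
-- (both lines contain aToken there, so the split has at least two parts)
def structurizedLogLineConsideringToken (aLogLine anotherLogLine : String)
    (maxParamValues : Int) (aToken : String) : String :=
  let firstLogLine := splitTextIntoByToken aLogLine aToken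
  let secondLogLine := splitTextIntoByToken anotherLogLine aToken
  let structuredLine :=
    structurizedLogLines (firstLogLine.getD 0 "") (secondLogLine.getD 0 "") maxParamValues
  let snd := if firstLogLine.getD 1 "" ≠ secondLogLine.getD 1 "" then " *"
             else firstLogLine.getD 1 ""
  PySem.Str.join aToken [structuredLine, snd]

-- NOTE Python's 'not(hasToken(a,t)) & (not(hasToken(b,t)))' parses as
-- 'not (hasToken(a,t) & (not hasToken(b,t)))' ('&' binds tighter than 'not') — kept as-is.
def structurizedSimilarLines (aLogLine anotherLogLine : String) (maxParamValues : Int)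
    (aToken : String) : Option String :=
  if bothHaveTheToken aLogLine anotherLogLine aToken then
    some (structurizedLogLineConsideringToken aLogLine anotherLogLine maxParamValues aToken)
  else if !(hasToken aLogLine aToken && !hasToken anotherLogLine aToken) then
    some (structurizedLogLines aLogLine anotherLogLine maxParamValues)
  else none  -- Python returns None here; unreachable from the entry (similarLines pass sameLength)

def getStructuredLine (aLine : String) (aListOfLines : List String) (aToken : String) : String :=
  aListOfLines.foldl (fun structuredLine similar =>
    let answer := (structurizedSimilarLines aLine similar 2 aToken).getD ""
    -- 'answer.count' on the (unreachable from the entry) None would raise in Python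
    if PySem.Str.count structuredLine "*" < PySem.Str.count answer "*" then answer
    else structuredLine) aLine

def sameLength (aLogLine anotherLogLine aToken : String) : Bool :=
  if bothHaveTheToken aLogLine anotherLogLine aToken then
    ((splitTextIntoByToken ((splitTextIntoByToken aLogLine aToken).getD 0 "") " ").length
      == (splitTextIntoByToken ((splitTextIntoByToken anotherLogLine aToken).getD 0 "") " ").length)
  else if !(hasToken aLogLine aToken && !hasToken anotherLogLine aToken) then
    -- same '&'-precedence parse as in structurizedSimilarLines
    ((splitTextIntoByToken aLogLine " ").length == (splitTextIntoByToken anotherLogLine " ").length)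
  else false

def makeSet (aList : List String) : List String :=
  (List.range aList.length).foldl (fun set index =>
    if PySem.List.count set (aList.getD index "") == 0 then set ++ [aList.getD index ""]
    else set) []

def compareLogLinesWithin (aLogLineArray : List String) (aToken : String) : List String :=
  makeSet (aLogLineArray.foldl (fun acc line =>
    let similarLines := aLogLineArray.filter (fun a => sameLength line a aToken)
    -- similarLines.remove(line): line is always a member (sameLength is reflexive);
    -- Python would raise ValueError otherwise
    let similarLines' := (PySem.List.remove? similarLines line).getD similarLines
    acc ++ [getStructuredLine line similarLines' aToken]) [])

-- ===== PORT B =====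
-- s.split(sep): exact for sep ≠ "" (ValueError on "", only for aToken = "" — excluded by Pre_)
def pvSplit (aText aToken : String) : List String :=
  (PySem.Str.split? aText aToken).getD []

def pvMergeWords (a b : String) : String :=
  let merged := PySem.Str.join " "
    (((pvSplit a " ").zip (pvSplit b " ")).map fun p => if p.1 == p.2 then p.1 else "*")
  if PySem.Str.count merged "*" > 2 then a else merged

def pvMergePair (aToken x y : String) : String :=
  if PySem.Str.isIn aToken x then
    let fx := pvSplit x aToken
    let fy := pvSplit y aToken
    -- fx[0]/fx[1]/fy[1] exist at every call from the entry (x, y contain aToken there)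
    let tail := if fx.getD 1 "" == fy.getD 1 "" then fx.getD 1 "" else " *"
    pvMergeWords (fx.getD 0 "") (fy.getD 0 "") ++ aToken ++ tail
  else pvMergeWords x y

def compareLogLinesWithin_alt (aLogLineArray : List String) (aToken : String) : List String :=
  -- one pass: byWC (full word count → every line), byHead (head word count → token lines), info
  let st := aLogLineArray.foldl
    (fun (st : PySem.Dict Nat (List String) × PySem.Dict Nat (List String) × List (Bool × Nat)) line =>
      let wc := (pvSplit line " ").length
      let byWC := st.1.modify wc [] (· ++ [line])
      if PySem.Str.isIn aToken line then
        let hc := (pvSplit ((pvSplit line aToken).getD 0 "") " ").length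
        (byWC, st.2.1.modify hc [] (· ++ [line]), st.2.2 ++ [(true, hc)])
      else
        (byWC, st.2.1, st.2.2 ++ [(false, wc)]))
    (PySem.Dict.empty, PySem.Dict.empty, [])
  let out := (aLogLineArray.zip st.2.2).foldl
    (fun (d : PySem.Dict String (Option Unit)) p =>
      let grp := if p.2.1 then st.2.1.getD p.2.2 [] else st.1.getD p.2.2 []
      -- grp.remove(line): p.1 is always a member of its own group
      let rest := (PySem.List.remove? grp p.1).getD grp
      let best := PySem.List.maxD (p.1 :: rest.map (pvMergePair aToken p.1))
        (fun s => PySem.Str.count s "*") p.1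
      d.insert best none)
    PySem.Dict.empty
  out.keys

-- ===== PRECONDITION & SPEC =====
-- Pre_ excludes exactly the inputs where Python A raises: aToken = "" with a nonempty
-- list makes str.split('') raise ValueError (B raises there too).
def Pre_compareLogLinesWithin (aLogLineArray : List String) (aToken : String) : Prop :=
  aToken ≠ "" ∨ aLogLineArray = []
instance (aLogLineArray : List String) (aToken : String) : Decidable (Pre_compareLogLinesWithin aLogLineArray aToken) := by unfold Pre_compareLogLinesWithin; infer_instance

def pvWitness_compareLogLinesWithin : List String × String :=
  (["a b;x", "a c;x", "q r", "q s"], ";")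

def Spec_compareLogLinesWithin (aLogLineArray : List String) (aToken : String) (out : List String) : Prop := out = compareLogLinesWithin_alt aLogLineArray aToken
instance (aLogLineArray : List String) (aToken : String) (out : List String) : Decidable (Spec_compareLogLinesWithin aLogLineArray aToken out) := by unfold Spec_compareLogLinesWithin; infer_instance

-- ===== CLAIM (what is proved, stated in full; the proofs are below) =====
def Claim_equal_compareLogLinesWithin : Prop := ∀ (aLogLineArray : List String) (aToken : String), Dom_compareLogLinesWithin aLogLineArray aToken → Pre_compareLogLinesWithin aLogLineArray aToken → Spec_compareLogLinesWithin aLogLineArray aToken (compareLogLinesWithin aLogLineArray aToken)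

-- ===== LEMMAS AND PROOFS =====

-- proof-side abbreviations for the quantities B's loop computes
def pvWcOf (l : String) : Nat := (pvSplit l " ").length
def pvHcOf (tok l : String) : Nat := (pvSplit ((pvSplit l tok).getD 0 "") " ").length
def pvInfoOf (tok l : String) : Bool × Nat :=
  if PySem.Str.isIn tok l then (true, pvHcOf tok l) else (false, pvWcOf l)

-- s.count(sub) > 0 iff sub occurs in s
lemma count_go_pos_iff (sub : List Char) (hsub : sub ≠ []) :
    ∀ (fuel : Nat) (l : List Char) (acc : Nat), l.length ≤ fuel →
      (0 < PySem.Chars.count.go sub fuel l acc ↔ 0 < acc ∨ sub <:+: l) := by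
  intro fuel
  induction fuel with
  | zero =>
    intro l acc hl
    have hln : l = [] := by cases l <;> simp_all
    subst hln
    simp [PySem.Chars.count.go, List.infix_nil, hsub]
  | succ n ih =>
    intro l acc hl
    cases l with
    | nil => simp [PySem.Chars.count.go, List.infix_nil, hsub]
    | cons h t =>
      rw [PySem.Chars.count.go]
      split
      · rename_i hp
        have hplen : 1 ≤ sub.length := by cases sub <;> simp_all
        have hdrop : (List.drop sub.length (h :: t)).length ≤ n := by
          simp only [List.length_drop, List.length_cons]
          simp only [List.length_cons] at hl
          omega
        rw [ih _ _ hdrop]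
        have hpre : sub <+: h :: t := List.isPrefixOf_iff_prefix.mp hp
        simp [hpre.isInfix]
      · rename_i hp
        have hpre : ¬ sub <+: h :: t := fun hc => hp (List.isPrefixOf_iff_prefix.mpr hc)
        rw [ih t acc (by simp at hl; omega)]
        rw [List.infix_cons_iff]
        tauto

lemma count_pos_iff_isIn (s sub : List Char) :
    (0 < PySem.Chars.count s sub) ↔ PySem.Chars.isIn sub s = true := by
  by_cases hsub : sub = []
  · subst hsub
    simp [PySem.Chars.count, PySem.Chars.isIn_nil]
  · rw [PySem.Chars.isIn_iff_infix]
    unfold PySem.Chars.count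
    rw [if_neg (by simpa using hsub)]
    rw [count_go_pos_iff sub hsub s.length s 0 le_rfl]
    simp

lemma hasToken_eq (l tok : String) : hasToken l tok = PySem.Str.isIn tok l := by
  simp only [hasToken, PySem.Str.count_eq, PySem.Str.isIn_eq]
  simp [count_pos_iff_isIn]

-- token.join([a, b]) = a + token + b
lemma join_pair (tok a b : String) : PySem.Str.join tok [a, b] = a ++ tok ++ b := by
  simp only [PySem.Str.join, List.map_cons, List.map_nil,
    PySem.Chars.join_cons_cons, PySem.Chars.join_singleton]
  rw [String.congr_append (a ++ tok) b, String.congr_append a tok]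
  simp

-- Python max([x]+l, key) is the first-max improve loop with start x
lemma max?_cons_cons {κ : Type} [LinearOrder κ] (key : String → κ) (x h : String) (t : List String) :
    PySem.List.max? (x :: h :: t) key
      = PySem.List.max? ((if key x < key h then h else x) :: t) key := by
  simp only [PySem.List.max?, List.foldl_cons]
  split_ifs <;> rfl

lemma maxD_cons_foldl {κ : Type} [LinearOrder κ] (key : String → κ) (l : List String) (x d : String) :
    PySem.List.maxD (x :: l) key d
      = l.foldl (fun m a => if key m < key a then a else m) x := by
  induction l generalizing x with
  | nil => rfl
  | cons h t ih =>
    simp only [PySem.List.maxD, max?_cons_cons key x h t]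
    simp only [PySem.List.maxD] at ih
    rw [ih]
    simp only [List.foldl_cons]

-- indexing by range over equal-length lists is the zip
lemma range_getD_map_zip {β : Type} (f : String → String → β) (l m : List String)
    (h : l.length = m.length) :
    (List.range l.length).map (fun i => f (l.getD i "") (m.getD i ""))
      = (l.zip m).map (fun p => f p.1 p.2) := by
  apply List.ext_getElem
  · simp [h]
  · intro i h1 h2
    simp only [List.getElem_map, List.getElem_range, List.getElem_zip]
    rw [List.getD_eq_getElem l "" (by simpa using h1),
        List.getD_eq_getElem m "" (by simp at h1 ⊢; omega)]

lemma SL_eq (a b : String) (h : pvWcOf a = pvWcOf b) :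
    structurizedLogLines a b 2 = pvMergeWords a b := by
  unfold structurizedLogLines pvMergeWords structurizedLineList
  dsimp only
  have hl : (splitTextIntoByToken a " ").length = (splitTextIntoByToken b " ").length := h
  rw [range_getD_map_zip structurizedIfEqualWords _ _ hl]
  have hfun : (fun p : String × String => structurizedIfEqualWords p.1 p.2)
      = (fun p : String × String => if p.1 == p.2 then p.1 else "*") := by
    funext p
    by_cases hp : p.1 = p.2 <;> simp [structurizedIfEqualWords, hp]
  rw [hfun]
  rw [show splitTextIntoByToken a " " = pvSplit a " " from rfl,
      show splitTextIntoByToken b " " = pvSplit b " " from rfl]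
  split_ifs with h1 h2 <;> first | rfl | (exfalso; omega)

lemma merge_eq (tok line o : String)
    (h : (PySem.Str.isIn tok line = true ∧ PySem.Str.isIn tok o = true ∧ pvHcOf tok o = pvHcOf tok line)
       ∨ (PySem.Str.isIn tok line = false ∧ pvWcOf o = pvWcOf line)) :
    (structurizedSimilarLines line o 2 tok).getD "" = pvMergePair tok line o := by
  unfold structurizedSimilarLines pvMergePair bothHaveTheToken
  rw [hasToken_eq line tok, hasToken_eq o tok]
  rcases h with ⟨h1, h2, h3⟩ | ⟨h1, h2⟩
  · rw [if_pos (by rw [h1, h2]; rfl), if_pos h1]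
    simp only [Option.getD_some]
    unfold structurizedLogLineConsideringToken
    dsimp only
    rw [join_pair]
    rw [show splitTextIntoByToken line tok = pvSplit line tok from rfl,
        show splitTextIntoByToken o tok = pvSplit o tok from rfl]
    rw [SL_eq _ _ h3.symm]
    by_cases ht : (pvSplit line tok).getD 1 "" = (pvSplit o tok).getD 1 "" <;> simp [ht]
  · rw [if_neg (by rw [h1]; exact Bool.false_ne_true),
        if_pos (by rw [h1]; rfl),
        if_neg (by rw [h1]; exact Bool.false_ne_true)]
    simp only [Option.getD_some]
    exact SL_eq _ _ h2.symm

lemma sameLength_char (tok line a : String) :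
    sameLength line a tok
      = (if PySem.Str.isIn tok line then
           PySem.Str.isIn tok a && (pvHcOf tok a == pvHcOf tok line)
         else (pvWcOf a == pvWcOf line)) := by
  unfold sameLength bothHaveTheToken
  rw [hasToken_eq line tok, hasToken_eq a tok]
  cases h1 : PySem.Str.isIn tok line <;> cases h2 : PySem.Str.isIn tok a <;>
    (simp only [h1, h2, Bool.false_and, Bool.true_and, Bool.and_false, Bool.and_true,
        Bool.not_false, Bool.not_true, if_false, if_true] <;>
     try simp [pvHcOf, pvWcOf, splitTextIntoByToken, pvSplit, Bool.beq_comm])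

-- the state triple of B's first loop, componentwise
lemma build_split (tok : String) (arr : List String)
    (d1 d2 : PySem.Dict Nat (List String)) (acc : List (Bool × Nat)) :
    arr.foldl
      (fun (st : PySem.Dict Nat (List String) × PySem.Dict Nat (List String) × List (Bool × Nat)) line =>
        let wc := (pvSplit line " ").length
        let byWC := st.1.modify wc [] (· ++ [line])
        if PySem.Str.isIn tok line then
          let hc := (pvSplit ((pvSplit line tok).getD 0 "") " ").length
          (byWC, st.2.1.modify hc [] (· ++ [line]), st.2.2 ++ [(true, hc)])
        else
          (byWC, st.2.1, st.2.2 ++ [(false, wc)]))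
      (d1, d2, acc)
    = (arr.foldl (fun d l => d.modify (pvWcOf l) [] (· ++ [l])) d1,
       (arr.filter (fun l => PySem.Str.isIn tok l)).foldl
         (fun d l => d.modify (pvHcOf tok l) [] (· ++ [l])) d2,
       acc ++ arr.map (pvInfoOf tok)) := by
  induction arr generalizing d1 d2 acc with
  | nil => simp
  | cons h t ih =>
    simp only [List.foldl_cons, List.filter_cons, List.map_cons]
    by_cases hh : PySem.Str.isIn tok h = true
    · rw [if_pos hh, ih]
      simp only [hh, if_true, List.foldl_cons, pvInfoOf, pvWcOf, pvHcOf,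
        List.append_assoc, List.cons_append, List.nil_append]
    · rw [if_neg hh, ih]
      have hh' : PySem.Str.isIn tok h = false := by
        cases hhh : PySem.Str.isIn tok h
        · rfl
        · exact absurd hhh hh
      simp only [hh', if_false, Bool.false_eq_true, List.foldl_cons, pvInfoOf, pvWcOf, pvHcOf,
        List.append_assoc, List.cons_append, List.nil_append]

lemma getD_modify_fold (key : String → Nat) (arr : List String) (k : Nat) :
    ((arr.foldl (fun d l => d.modify (key l) [] (· ++ [l])) PySem.Dict.empty).getD k [])
      = arr.filter (fun l => key l == k) := by
  have h := PySem.Dict.getD_foldl_modify_append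
    (arr.map (fun l => (key l, l))) (PySem.Dict.empty (κ := Nat) (ν := List String)) k
  rw [List.foldl_map] at h
  simp only [List.filter_map, List.map_map, PySem.Dict.getD_empty, List.nil_append] at h
  rw [h]
  simp [Function.comp_def]

lemma zip_self_map {β : Type} (f : String → β) (arr : List String) :
    arr.zip (arr.map f) = arr.map (fun a => (a, f a)) := by
  induction arr with
  | nil => rfl
  | cons h t ih => simp [ih]

lemma map_getD_range (l : List String) :
    (List.range l.length).map (fun i => l.getD i "") = l := by
  apply List.ext_getElem
  · simp
  · intro i h1 h2
    simp only [List.getElem_map, List.getElem_range]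
    rw [List.getD_eq_getElem l "" (by simpa using h1)]

lemma makeSet_eq_ofList (l : List String) : makeSet l = PySem.Set.ofList l := by
  unfold makeSet
  have hmap : ((List.range l.length).map (fun i => l.getD i "")).foldl
        (fun s x => if PySem.List.count s x == 0 then s ++ [x] else s) []
      = (List.range l.length).foldl (fun set index =>
          if PySem.List.count set (l.getD index "") == 0 then set ++ [l.getD index ""]
          else set) [] := by
    rw [List.foldl_map]
  rw [← hmap, map_getD_range]
  have hstep : (fun (s : List String) (x : String) =>
      if PySem.List.count s x == 0 then s ++ [x] else s) = PySem.Set.add := by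
    funext s x
    by_cases hm : x ∈ s <;>
      simp [PySem.Set.add, PySem.Set.contains, PySem.List.count_eq, List.count_eq_zero, hm]
  rw [hstep, PySem.Set.ofList_eq_foldl]

-- per-line: A's filter+improve-loop equals B's group lookup + max
lemma foldl_pick_map (AM : String → String) (rest : List String) (x : String) :
    rest.foldl (fun s sim =>
        if PySem.Str.count s "*" < PySem.Str.count (AM sim) "*" then AM sim else s) x
      = (rest.map AM).foldl
          (fun m a => if PySem.Str.count m "*" < PySem.Str.count a "*" then a else m) x := by
  rw [List.foldl_map]

lemma perline (tok : String) (arr : List String) (line : String) (hmem : line ∈ arr) :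
    (let similarLines := arr.filter (fun a => sameLength line a tok)
     getStructuredLine line ((PySem.List.remove? similarLines line).getD similarLines) tok)
    = (let grp := if PySem.Str.isIn tok line then
           arr.filter (fun a => (pvHcOf tok a == pvHcOf tok line) && PySem.Str.isIn tok a)
         else arr.filter (fun a => pvWcOf a == pvWcOf line)
       let rest := (PySem.List.remove? grp line).getD grp
       PySem.List.maxD (line :: rest.map (pvMergePair tok line))
         (fun s => PySem.Str.count s "*") line) := by
  dsimp only
  have hfilt : arr.filter (fun a => sameLength line a tok)
      = (if PySem.Str.isIn tok line then
           arr.filter (fun a => (pvHcOf tok a == pvHcOf tok line) && PySem.Str.isIn tok a)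
         else arr.filter (fun a => pvWcOf a == pvWcOf line)) := by
    by_cases ht : PySem.Str.isIn tok line = true
    · rw [if_pos ht]
      apply List.filter_congr
      intro a _
      rw [sameLength_char, if_pos ht, Bool.and_comm]
    · have ht' : PySem.Str.isIn tok line = false := by
        cases hx : PySem.Str.isIn tok line
        · rfl
        · exact absurd hx ht
      rw [if_neg ht]
      apply List.filter_congr
      intro a _
      rw [sameLength_char, if_neg (by rw [ht']; exact Bool.false_ne_true)]
  rw [hfilt]
  set grp := (if PySem.Str.isIn tok line then
           arr.filter (fun a => (pvHcOf tok a == pvHcOf tok line) && PySem.Str.isIn tok a)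
         else arr.filter (fun a => pvWcOf a == pvWcOf line)) with hgrp
  have hlmem : line ∈ grp := by
    rw [hgrp]
    by_cases ht : PySem.Str.isIn tok line = true
    · rw [if_pos ht]
      refine List.mem_filter.mpr ⟨hmem, ?_⟩
      rw [ht]
      simp
    · rw [if_neg ht]
      exact List.mem_filter.mpr ⟨hmem, by simp⟩
  rw [PySem.List.remove?_eq_some_erase grp line hlmem]
  simp only [Option.getD_some]
  unfold getStructuredLine
  dsimp only
  rw [foldl_pick_map (fun sim => (structurizedSimilarLines line sim 2 tok).getD "")
    (grp.erase line) line]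
  have hmap : (grp.erase line).map (fun sim => (structurizedSimilarLines line sim 2 tok).getD "")
      = (grp.erase line).map (pvMergePair tok line) := by
    apply List.map_congr_left
    intro o ho
    have hog : o ∈ grp := List.mem_of_mem_erase ho
    apply merge_eq
    by_cases ht : PySem.Str.isIn tok line = true
    · rw [hgrp, if_pos ht] at hog
      have hp := (List.mem_filter.mp hog).2
      simp only [Bool.and_eq_true, beq_iff_eq] at hp
      exact Or.inl ⟨ht, hp.2, hp.1⟩
    · have ht' : PySem.Str.isIn tok line = false := by
        cases hx : PySem.Str.isIn tok line
        · rfl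
        · exact absurd hx ht
      rw [hgrp, if_neg ht] at hog
      have hp := (List.mem_filter.mp hog).2
      simp only [beq_iff_eq] at hp
      exact Or.inr ⟨ht', hp⟩
  rw [hmap, maxD_cons_foldl]

-- ===== VERDICT (by name: the statement is the Claim_ definition above) =====
theorem compareLogLinesWithin_spec : Claim_equal_compareLogLinesWithin := by
  intro arr tok _ _
  unfold Spec_compareLogLinesWithin compareLogLinesWithin compareLogLinesWithin_alt
  dsimp only
  rw [PySem.List.foldl_append_singleton_eq_map
    (fun line =>
      getStructuredLine line
        ((PySem.List.remove? (arr.filter (fun a => sameLength line a tok)) line).getD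
          (arr.filter (fun a => sameLength line a tok))) tok) arr []]
  rw [List.nil_append, makeSet_eq_ofList]
  rw [build_split]
  dsimp only
  rw [List.nil_append, zip_self_map, List.foldl_map]
  rw [PySem.Dict.keys_foldl_insert_key arr
    (fun l =>
      let grp := if (pvInfoOf tok l).1 then
          ((arr.filter (fun x => PySem.Str.isIn tok x)).foldl
            (fun d x => d.modify (pvHcOf tok x) [] (· ++ [x])) PySem.Dict.empty).getD (pvInfoOf tok l).2 []
        else
          (arr.foldl (fun d x => d.modify (pvWcOf x) [] (· ++ [x])) PySem.Dict.empty).getD (pvInfoOf tok l).2 []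
      let rest := (PySem.List.remove? grp l).getD grp
      PySem.List.maxD (l :: rest.map (pvMergePair tok l)) (fun s => PySem.Str.count s "*") l)
    (fun _ _ => none) PySem.Dict.empty]
  rw [PySem.Dict.keys_empty]
  rw [show (PySem.Set.update ([] : List String) : List String → List String)
        = PySem.Set.ofList from by
    funext xs
    rw [PySem.Set.ofList_eq_foldl]; rfl]
  congr 1
  apply List.map_congr_left
  intro line hmem
  rw [perline tok arr line hmem]
  dsimp only
  by_cases ht : PySem.Str.isIn tok line = true
  · simp only [pvInfoOf, ht, if_true]
    rw [getD_modify_fold (pvHcOf tok) (arr.filter (fun x => PySem.Str.isIn tok x)) (pvHcOf tok line),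
      List.filter_filter]
  · have ht' : PySem.Str.isIn tok line = false := by
      cases hx : PySem.Str.isIn tok line
      · rfl
      · exact absurd hx ht
    simp only [pvInfoOf, ht', Bool.false_eq_true, if_false]
    rw [getD_modify_fold pvWcOf arr (pvWcOf line)]
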